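-- pv_equiv track=rewrite | github.com/NJU-LINK/CodeTracer | src/codetracer/services/memory.py | _condense_messages
-- ===== SOURCE A (Python) =====
-- from typing import Any
--
-- def _condense_messages(messages: list[dict[str, Any]], max_chars: int = 30_000) -> str:
--     """Build a condensed view of messages for extraction.
--
--     Keeps the system message in full, then samples assistant/user
--     messages from the tail of the conversation, trimming to fit
--     within *max_chars*.
--     """
--     parts: list[str] = []
--     total = 0
--
--     # Always include system messages
--     for m in messages:
--         if m.get("role") == "system":
--             text = m["content"][:3000]
--             parts.append(f"[system] {text}")
--             total += len(text)
--
--     # Include recent messages (most relevant for pattern extraction)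
--     for m in reversed(messages):
--         if m.get("role") == "system":
--             continue
--         role = m.get("role", "?")
--         text = m.get("content", "")
--         # Trim individual messages to 2000 chars
--         if len(text) > 2000:
--             text = text[:1000] + "\n...[trimmed]...\n" + text[-1000:]
--         entry = f"[{role}] {text}"
--         if total + len(entry) > max_chars:
--             break
--         parts.append(entry)
--         total += len(entry)
--
--     return "\n---\n".join(parts)
-- ===== SOURCE B (Python) =====
-- def _entry(m):
--     role = m.get("role", "?")
--     text = m.get("content", "")
--     if len(text) > 2000:
--         text = text[:1000] + "\n...[trimmed]...\n" + text[-1000:]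
--     return f"[{role}] {text}"
--
--
-- def _condense_messages(messages, max_chars=30_000):
--     system = [m for m in messages if m.get("role") == "system"]
--     sys_parts = [f"[system] {m['content'][:3000]}" for m in system]
--     total = sum(len(m["content"][:3000]) for m in system)
--
--     # All candidate tail entries, newest first, with no budget check.
--     entries = [_entry(m) for m in reversed(messages) if m.get("role") != "system"]
--
--     # Cumulative lengths starting from the system total.
--     prefix = []
--     run = total
--     for e in entries:
--         run += len(e)
--         prefix.append(run)
--
--     # Keep the longest prefix whose cumulative length stays within budget.
--     cut = next((i for i, s in enumerate(prefix) if s > max_chars), len(entries))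
--     return "\n---\n".join(sys_parts + entries[:cut])
-- ===== Notes on version B (the rewrite author's own statement) =====
-- stated objective: alternative
-- what changed: B replaces A's budget-checked break loop with a three-stage pipeline: comprehensions build the system parts and all candidate tail entries first, then a prefix-sum cutoff index is computed and the kept prefix is sliced off; the system pass becomes filter/map/sum comprehensions.
-- outside the precondition, e.g. on _condense_messages([{'role': 'system'}], 100): A raises KeyError, B raises KeyError
import Mathlib
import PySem

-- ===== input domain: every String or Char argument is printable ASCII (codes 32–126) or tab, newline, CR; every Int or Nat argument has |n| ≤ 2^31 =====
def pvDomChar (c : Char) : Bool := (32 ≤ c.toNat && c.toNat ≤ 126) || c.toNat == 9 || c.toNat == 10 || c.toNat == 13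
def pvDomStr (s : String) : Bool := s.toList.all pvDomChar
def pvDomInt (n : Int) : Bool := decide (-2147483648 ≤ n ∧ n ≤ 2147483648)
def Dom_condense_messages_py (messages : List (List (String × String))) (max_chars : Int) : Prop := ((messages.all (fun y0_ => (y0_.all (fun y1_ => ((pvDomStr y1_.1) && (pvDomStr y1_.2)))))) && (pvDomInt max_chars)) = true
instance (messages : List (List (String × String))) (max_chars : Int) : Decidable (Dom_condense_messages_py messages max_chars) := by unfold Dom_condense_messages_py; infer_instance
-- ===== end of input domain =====

-- B rebuilds the same condensed view by a different decomposition: comprehensions build the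
-- system parts and ALL candidate tail entries first, then a prefix-sum cutoff replaces A's
-- budget-checked break loop (objective: alternative; same cost).
-- Equivalence is about the return value; neither program mutates its arguments.

-- dict lookup m.get(k): first match in the association list (shared primitive of both ports)
def pvLookup (m : List (String × String)) (k : String) : Option String :=
  (m.find? (fun p => p.1 == k)).map (·.2)

-- ===== PORT A =====
-- first pass: for m in messages: if role == "system": append "[system] " + content[:3000], count len(text)
def pvSysStepA (acc : List String × Int) (m : List (String × String)) : List String × Int :=
  if pvLookup m "role" == some "system" then
    let text := PySem.Str.slice ((pvLookup m "content").getD "") none (some 3000)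
    (acc.1 ++ ["[system] " ++ text], acc.2 + PySem.Str.len text)
  else acc

def pvSysLoopA (messages : List (List (String × String))) : List String × Int :=
  messages.foldl pvSysStepA ([], 0)

-- second pass over reversed(messages), with break on budget overflow
def pvTailLoopA (ms : List (List (String × String))) (parts : List String) (total : Int)
    (max_chars : Int) : List String :=
  match ms with
  | [] => parts
  | m :: rest =>
    if pvLookup m "role" == some "system" then pvTailLoopA rest parts total max_chars
    else
      let role := (pvLookup m "role").getD "?"
      let text0 := (pvLookup m "content").getD ""
      let text := if PySem.Str.len text0 > 2000 then
          PySem.Str.slice text0 none (some 1000) ++ "\n...[trimmed]...\n" ++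
            PySem.Str.slice text0 (some (-1000)) none
        else text0
      let entry := "[" ++ role ++ "] " ++ text
      if total + PySem.Str.len entry > max_chars then parts
      else pvTailLoopA rest (parts ++ [entry]) (total + PySem.Str.len entry) max_chars

def condense_messages_py (messages : List (List (String × String))) (max_chars : Int) : String :=
  let s := pvSysLoopA messages
  PySem.Str.join "\n---\n" (pvTailLoopA messages.reverse s.1 s.2 max_chars)

-- ===== PORT B =====
-- helper _entry(m)
def pvEntry (m : List (String × String)) : String :=
  let role := (pvLookup m "role").getD "?"
  let text0 := (pvLookup m "content").getD ""
  let text := if PySem.Str.len text0 > 2000 then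
      PySem.Str.slice text0 none (some 1000) ++ "\n...[trimmed]...\n" ++
        PySem.Str.slice text0 (some (-1000)) none
    else text0
  "[" ++ role ++ "] " ++ text

def pvSysText (m : List (String × String)) : String :=
  PySem.Str.slice ((pvLookup m "content").getD "") none (some 3000)

def condense_messages_py_alt (messages : List (List (String × String))) (max_chars : Int) : String :=
  let system := messages.filter (fun m => pvLookup m "role" == some "system")
  let sys_parts := system.map (fun m => "[system] " ++ pvSysText m)
  let total := (system.map (fun m => PySem.Str.len (pvSysText m))).sum
  let entries := (messages.reverse.filter (fun m => !(pvLookup m "role" == some "system"))).map pvEntry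
  -- pref: the loop 'run += len(e); prefix.append(run)'
  let pref := (entries.foldl (fun (acc : List Int × Int) e =>
      (acc.1 ++ [acc.2 + PySem.Str.len e], acc.2 + PySem.Str.len e)) ([], total)).1
  -- cut = next((i for i, s in enumerate(prefix) if s > max_chars), len(entries))
  let cut : Int := (((PySem.List.enumerate pref 0).find? (fun p => decide (p.2 > max_chars))).map (·.1)).getD (entries.length : Int)
  PySem.Str.join "\n---\n" (sys_parts ++ entries.take cut.toNat)

-- ===== PRECONDITION & SPEC =====
-- Pre_ excludes inputs where a message whose first "role" entry is "system" has no "content"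
-- key: there BOTH A and B raise KeyError (m["content"]).
def Pre_condense_messages_py (messages : List (List (String × String))) (max_chars : Int) : Prop :=
  ∀ m ∈ messages, pvLookup m "role" = some "system" → pvLookup m "content" ≠ none
instance (messages : List (List (String × String))) (max_chars : Int) : Decidable (Pre_condense_messages_py messages max_chars) := by unfold Pre_condense_messages_py; infer_instance

def pvWitness_condense_messages_py : (List (List (String × String))) × Int :=
  ([[("role", "system"), ("content", "hello")], [("role", "user"), ("content", "hi")]], 100)

def Spec_condense_messages_py (messages : List (List (String × String))) (max_chars : Int) (out : String) : Prop := out = condense_messages_py_alt messages max_chars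
instance (messages : List (List (String × String))) (max_chars : Int) (out : String) : Decidable (Spec_condense_messages_py messages max_chars out) := by unfold Spec_condense_messages_py; infer_instance

-- ===== CLAIM (what is proved, stated in full; the proofs are below) =====
def Claim_equal_condense_messages_py : Prop := ∀ (messages : List (List (String × String))) (max_chars : Int), Dom_condense_messages_py messages max_chars → Pre_condense_messages_py messages max_chars → Spec_condense_messages_py messages max_chars (condense_messages_py messages max_chars)

-- ===== LEMMAS AND PROOFS =====

-- recursive "keep while within budget" spec, the meeting point of both sides
def pvKeep (es : List String) (total max_chars : Int) : List String :=
  match es with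
  | [] => []
  | e :: rest =>
    if total + PySem.Str.len e > max_chars then []
    else e :: pvKeep rest (total + PySem.Str.len e) max_chars

-- A's tail loop appends exactly pvKeep of the entry list
theorem pvTailLoopA_eq (ms : List (List (String × String))) (parts : List String)
    (total max_chars : Int) :
    pvTailLoopA ms parts total max_chars =
      parts ++ pvKeep ((ms.filter (fun m => !(pvLookup m "role" == some "system"))).map pvEntry)
        total max_chars := by
  induction ms generalizing parts total with
  | nil => simp [pvTailLoopA, pvKeep]
  | cons m rest ih =>
    by_cases h : pvLookup m "role" == some "system"
    · simp [pvTailLoopA, h, ih]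
    · rw [pvTailLoopA, if_neg (by simp_all)]
      simp only [List.filter_cons, h, Bool.not_false, if_pos, List.map_cons]
      show (if total + PySem.Str.len (pvEntry m) > max_chars then parts
        else pvTailLoopA rest (parts ++ [pvEntry m]) (total + PySem.Str.len (pvEntry m)) max_chars) = _
      rw [pvKeep]
      by_cases hb : total + PySem.Str.len (pvEntry m) > max_chars
      · rw [if_pos hb, if_pos hb]; simp
      · rw [if_neg hb, if_neg hb, ih]; simp

-- B's prefix-sum fold, characterised recursively
def pvPrefix (es : List String) (run : Int) : List Int :=
  match es with
  | [] => []
  | e :: rest => (run + PySem.Str.len e) :: pvPrefix rest (run + PySem.Str.len e)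

theorem pvFoldPrefix (es : List String) (acc : List Int) (run : Int) :
    (es.foldl (fun (acc : List Int × Int) e =>
      (acc.1 ++ [acc.2 + PySem.Str.len e], acc.2 + PySem.Str.len e)) (acc, run)).1 =
      acc ++ pvPrefix es run := by
  induction es generalizing acc run with
  | nil => simp [pvPrefix]
  | cons e rest ih =>
    rw [List.foldl_cons, ih]
    simp [pvPrefix]

-- shifting enumerate's start shifts the found index
theorem pvFind_shift (max_chars : Int) (l : List Int) (s : Int) :
    ((PySem.List.enumerate l (s+1)).find? (fun p => decide (p.2 > max_chars))).map (·.1) =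
      (((PySem.List.enumerate l s).find? (fun p => decide (p.2 > max_chars))).map (·.1)).map (· + 1) := by
  induction l generalizing s with
  | nil => simp [PySem.List.enumerate]
  | cons x xs ih =>
    simp only [PySem.List.enumerate, List.find?_cons]
    by_cases hx : x > max_chars
    · simp [hx]
    · simp only [hx, decide_false]
      simpa [Int.add_comm, Int.add_assoc, Int.add_left_comm] using ih (s+1)

-- take-of-cutoff on the prefix sums equals pvKeep
theorem pvTake_cut_eq_keep (max_chars : Int) (es : List String) (total : Int) :
    es.take ((((PySem.List.enumerate (pvPrefix es total) 0).find?
        (fun p => decide (p.2 > max_chars))).map (·.1)).getD (es.length : Int)).toNat =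
      pvKeep es total max_chars := by
  induction es generalizing total with
  | nil => simp [pvPrefix, pvKeep]
  | cons e rest ih =>
    simp only [pvPrefix, pvKeep]
    by_cases hb : total + PySem.Str.len e > max_chars
    · have hb' : max_chars < total + (e.length : Int) := by
        simpa [PySem.Str.len] using hb
      simp [PySem.List.enumerate, hb']
    · simp only [PySem.List.enumerate, List.find?_cons, hb, decide_false]
      rw [show (0:Int) + 1 = 1 by ring]
      rw [show (1:Int) = 0 + 1 by ring, pvFind_shift]
      cases hf : ((PySem.List.enumerate (pvPrefix rest (total + PySem.Str.len e)) 0).find?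
          (fun p => decide (p.2 > max_chars))).map (·.1) with
      | none =>
          rw [← ih (total + PySem.Str.len e), hf]
          simp [List.take_succ_cons]
      | some k =>
          have hk : 0 ≤ k := by
            rcases Option.map_eq_some_iff.mp hf with ⟨p, hp, rfl⟩
            rcases (PySem.List.mem_enumerate_iff _ _ _).mp (List.mem_of_find?_eq_some hp) with ⟨j, hj, rfl⟩
            simp
          rw [← ih (total + PySem.Str.len e), hf]
          simp [show (k + 1).toNat = k.toNat + 1 from by omega, List.take_succ_cons]

-- the system fold with generalized accumulator
theorem pvSysLoopA_gen (messages : List (List (String × String))) (parts : List String) (tot : Int) :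
    messages.foldl pvSysStepA (parts, tot) =
      ((parts ++ (messages.filter (fun m => pvLookup m "role" == some "system")).map
          (fun m => "[system] " ++ pvSysText m)),
        (tot + ((messages.filter (fun m => pvLookup m "role" == some "system")).map
          (fun m => PySem.Str.len (pvSysText m))).sum)) := by
  induction messages generalizing parts tot with
  | nil =>
    simp only [List.foldl_nil, List.filter_nil, List.map_nil, List.sum_nil, List.append_nil,
      Int.add_zero]
  | cons m rest ih =>
    rw [List.foldl_cons]
    by_cases h : pvLookup m "role" == some "system"
    · rw [show pvSysStepA (parts, tot) m =
          ((parts ++ ["[system] " ++ pvSysText m]), tot + PySem.Str.len (pvSysText m)) from by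
        simp [pvSysStepA, pvSysText, h]]
      rw [ih, show List.filter (fun m => pvLookup m "role" == some "system") (m :: rest) =
          m :: List.filter (fun m => pvLookup m "role" == some "system") rest from by
        simp [h]]
      simp only [List.map_cons, List.sum_cons, List.append_assoc, List.singleton_append,
        Int.add_assoc]
    · rw [show pvSysStepA (parts, tot) m = (parts, tot) from by simp [pvSysStepA, h]]
      rw [ih, show List.filter (fun m => pvLookup m "role" == some "system") (m :: rest) =
          List.filter (fun m => pvLookup m "role" == some "system") rest from by
        simp [h]]

theorem pv_main (messages : List (List (String × String))) (max_chars : Int) :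
    condense_messages_py messages max_chars = condense_messages_py_alt messages max_chars := by
  unfold condense_messages_py condense_messages_py_alt pvSysLoopA
  rw [pvSysLoopA_gen]
  simp only [List.nil_append, Int.zero_add]
  rw [pvTailLoopA_eq, pvFoldPrefix]
  rw [List.nil_append, pvTake_cut_eq_keep]

-- ===== VERDICT (by name: the statement is the Claim_ definition above) =====
theorem condense_messages_py_spec : Claim_equal_condense_messages_py := by
  intro messages max_chars _ _
  unfold Spec_condense_messages_py
  exact pv_main messages max_chars
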